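-- pv_equiv track=rewrite | github.com/pinobatch/full-quiet-oss | tools/strips.py | setsimilarities
-- ===== SOURCE A (Python) =====
-- def setsimilarities(sets, othersets=None):
--     """Find the most similar elements in an iterable of iterables.
--
-- Often used to find matches in a list of lists of items.
--
-- sets -- column 1
-- othersets -- column 2; if None use sets
--
-- Return a list of (sets index, othersets index, number of shared elements)
-- """
--     sets = [frozenset(s) for s in sets]
--     othersets = ([frozenset(s) for s in othersets]
--                  if othersets is not None
--                  else sets)
--     return sorted((
--         (ai, bi, len(a.intersection(b)))
--         for ai, a in enumerate(sets)
--         for bi, b in enumerate(othersets)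
--         if bi > ai
--     ), key=(lambda row: row[2]), reverse=True)
-- ===== SOURCE B (Python) =====
-- def setsimilarities(sets, othersets=None):
--     """Find the most similar elements in an iterable of iterables.
--
-- Inverted-index re-implementation: posting lists per element instead of
-- pairwise set intersections.
-- """
--     deduped = [list(dict.fromkeys(s)) for s in sets]
--     otherded = (deduped if othersets is None
--                 else [list(dict.fromkeys(s)) for s in othersets])
--     # inverted index over column 2: element -> list of othersets indices
--     index = {}
--     for bi, es in enumerate(otherded):
--         for e in es:
--             index.setdefault(e, []).append(bi)
--     # shared-element count per (ai, bi) pair, via posting lists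
--     counts = {}
--     for ai, es in enumerate(deduped):
--         for e in es:
--             for bi in index.get(e, ()):
--                 key = (ai, bi)
--                 counts[key] = counts.get(key, 0) + 1
--     rows = [(ai, bi, counts.get((ai, bi), 0))
--             for ai in range(len(deduped))
--             for bi in range(len(otherded))
--             if bi > ai]
--     rows.sort(key=lambda row: row[2], reverse=True)
--     return rows
-- ===== Notes on version B (the rewrite author's own statement) =====
-- stated objective: alternative
-- what changed: Replaces the all-pairs frozenset intersections with an inverted index (element -> posting list of othersets indices) whose posting-list traversal accumulates per-pair shared-element counts into a dict, after which all bi>ai pairs are emitted in lexicographic order and stably sorted by count descending.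
import Mathlib
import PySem

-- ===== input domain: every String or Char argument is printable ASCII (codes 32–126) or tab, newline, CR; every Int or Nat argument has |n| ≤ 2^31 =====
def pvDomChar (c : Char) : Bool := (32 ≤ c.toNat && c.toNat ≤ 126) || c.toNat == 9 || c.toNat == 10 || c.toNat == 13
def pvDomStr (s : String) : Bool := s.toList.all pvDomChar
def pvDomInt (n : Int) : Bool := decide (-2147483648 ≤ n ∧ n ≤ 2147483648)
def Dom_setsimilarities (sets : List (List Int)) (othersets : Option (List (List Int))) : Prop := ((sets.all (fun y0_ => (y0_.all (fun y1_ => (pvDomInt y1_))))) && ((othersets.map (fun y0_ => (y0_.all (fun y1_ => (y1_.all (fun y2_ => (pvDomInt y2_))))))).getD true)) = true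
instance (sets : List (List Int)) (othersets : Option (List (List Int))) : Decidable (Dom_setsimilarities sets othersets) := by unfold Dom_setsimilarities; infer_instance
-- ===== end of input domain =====

-- B replaces the all-pairs frozenset intersections with an inverted index whose posting
-- lists accumulate per-pair shared-element counts (alternative decomposition, same result).

-- ===== PORT A =====
def setsimilarities (sets : List (List Int)) (othersets : Option (List (List Int))) : List (Int × Int × Int) :=
  -- sets = [frozenset(s) for s in sets]
  let setsF : List (PySem.Set Int) := sets.map (fun s => PySem.Set.ofList s)
  -- othersets = [frozenset(s) for s in othersets] if othersets is not None else sets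
  let othersF : List (PySem.Set Int) :=
    match othersets with
    | some o => o.map (fun s => PySem.Set.ofList s)
    | none => setsF
  -- sorted(((ai, bi, len(a.intersection(b))) for ai, a in ... for bi, b in ... if bi > ai),
  --        key=lambda row: row[2], reverse=True)
  PySem.List.sorted
    ((PySem.List.enumerate setsF).flatMap (fun p =>
      ((PySem.List.enumerate othersF).filter (fun q => decide (p.1 < q.1))).map
        (fun q => (p.1, q.1, PySem.Set.len (PySem.Set.inter p.2 q.2)))))
    (fun row => row.2.2) true

-- ===== PORT B =====
def setsimilarities_alt (sets : List (List Int)) (othersets : Option (List (List Int))) : List (Int × Int × Int) :=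
  -- deduped = [list(dict.fromkeys(s)) for s in sets]
  let deduped : List (List Int) := sets.map (fun s => PySem.List.dedup s)
  let otherded : List (List Int) :=
    match othersets with
    | some o => o.map (fun s => PySem.List.dedup s)
    | none => deduped
  -- for bi, es in enumerate(otherded): for e in es: index.setdefault(e, []).append(bi)
  -- (setdefault(e, []).append(bi) is exactly d[e] = d.get(e, []) + [bi], i.e. Dict.modify e [] (· ++ [bi]))
  let index : PySem.Dict Int (List Int) :=
    (PySem.List.enumerate otherded).foldl (fun d p =>
      p.2.foldl (fun d e => d.modify e [] (fun l => l ++ [p.1])) d) PySem.Dict.empty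
  -- for ai, es in enumerate(deduped): for e in es: for bi in index.get(e, ()): counts[key] = counts.get(key, 0) + 1
  let counts : PySem.Dict (Int × Int) Int :=
    (PySem.List.enumerate deduped).foldl (fun c p =>
      p.2.foldl (fun c e =>
        (index.getD e []).foldl (fun c bi => c.modify (p.1, bi) 0 (fun x => x + 1)) c) c)
      PySem.Dict.empty
  -- rows = [(ai, bi, counts.get((ai, bi), 0)) for ai in range(len(deduped)) for bi in range(len(otherded)) if bi > ai]
  let rows : List (Int × Int × Int) :=
    (PySem.List.pyRange 0 deduped.length).flatMap (fun ai =>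
      ((PySem.List.pyRange 0 otherded.length).filter (fun bi => decide (ai < bi))).map
        (fun bi => (ai, bi, counts.getD (ai, bi) 0)))
  -- rows.sort(key=lambda row: row[2], reverse=True)
  PySem.List.sorted rows (fun row => row.2.2) true

-- ===== PRECONDITION & SPEC =====
def Spec_setsimilarities (sets : List (List Int)) (othersets : Option (List (List Int))) (out : List (Int × Int × Int)) : Prop := out = setsimilarities_alt sets othersets
instance (sets : List (List Int)) (othersets : Option (List (List Int))) (out : List (Int × Int × Int)) : Decidable (Spec_setsimilarities sets othersets out) := by unfold Spec_setsimilarities; infer_instance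

-- ===== CLAIM (what is proved, stated in full; the proofs are below) =====
def Claim_equal_setsimilarities : Prop := ∀ (sets : List (List Int)) (othersets : Option (List (List Int))), Dom_setsimilarities sets othersets → Spec_setsimilarities sets othersets (setsimilarities sets othersets)

-- ===== LEMMAS AND PROOFS =====

lemma count_map_pair_fst (l : List Int) (c a b : Int) :
    (l.map (fun y => (c, y))).count (a, b) = if a = c then l.count b else 0 := by
  induction l with
  | nil => simp
  | cons x t ih =>
    simp only [List.map_cons, List.count_cons, ih, Prod.mk.injEq, beq_iff_eq]
    by_cases hac : a = c
    · subst hac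
      by_cases hbx : x = b <;> simp [hbx]
    · simp [hac]
      exact fun h => absurd h.symm hac

lemma count_map_pair_snd (l : List Int) (c a b : Int) :
    (l.map (fun y => (y, c))).count (a, b) = if b = c then l.count a else 0 := by
  induction l with
  | nil => simp
  | cons x t ih =>
    simp only [List.map_cons, List.count_cons, ih, Prod.mk.injEq, beq_iff_eq]
    by_cases hbc : b = c
    · subst hbc
      by_cases hax : x = a <;> simp [hax]
    · simp [hbc]
      exact fun _ h => absurd h.symm hbc

lemma count_flatMap_fstTag (g : Nat → List Int) (n k : Nat) (b : Int) :
    ((List.range n).flatMap (fun j => (g j).map (fun y => ((j : Int), y)))).count ((k : Int), b)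
      = if k < n then (g k).count b else 0 := by
  induction n with
  | zero => simp
  | succ m ih =>
    rw [List.range_succ, List.flatMap_append, List.count_append, ih]
    simp only [List.flatMap_cons, List.flatMap_nil, List.append_nil, count_map_pair_fst]
    by_cases hkm : k = m
    · subst hkm; simp
    · have : ¬ ((k : Int) = (m : Int)) := by exact_mod_cast hkm
      by_cases hlt : k < m <;> simp [this, hlt] <;> omega

lemma count_flatMap_sndTag (g : Nat → List Int) (n k : Nat) (a : Int) :
    ((List.range n).flatMap (fun j => (g j).map (fun y => (y, (j : Int))))).count (a, (k : Int))
      = if k < n then (g k).count a else 0 := by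
  induction n with
  | zero => simp
  | succ m ih =>
    rw [List.range_succ, List.flatMap_append, List.count_append, ih]
    simp only [List.flatMap_cons, List.flatMap_nil, List.append_nil, count_map_pair_snd]
    by_cases hkm : k = m
    · subst hkm; simp
    · have : ¬ ((k : Int) = (m : Int)) := by exact_mod_cast hkm
      by_cases hlt : k < m <;> simp [this, hlt] <;> omega

lemma count_map_snd_filter_fst (l : List (Int × Int)) (e bi : Int) :
    ((l.filter (fun p => p.1 == e)).map (fun p => p.2)).count bi = l.count (e, bi) := by
  induction l with
  | nil => simp
  | cons p t ih =>
    obtain ⟨p1, p2⟩ := p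
    by_cases h1 : p1 = e
    · subst h1
      by_cases h2 : p2 = bi <;>
        simp [ih, h2, Prod.ext_iff]
    · simp [ih, h1, Prod.ext_iff]

lemma sum_map_indicator (l : List Int) (p : Int → Prop) [DecidablePred p] :
    (l.map (fun e => if p e then 1 else 0)).sum = l.countP (fun e => decide (p e)) := by
  induction l with
  | nil => simp
  | cons x t ih => by_cases h : p x <;> simp [ih, h, Nat.add_comm]

def pvIndex (T : List (List Int)) : PySem.Dict Int (List Int) :=
  (PySem.List.enumerate T).foldl (fun d p =>
    p.2.foldl (fun d e => d.modify e [] (fun l => l ++ [p.1])) d) PySem.Dict.empty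

lemma index_getD (T : List (List Int)) (e : Int) :
    (pvIndex T).getD e []
      = (((PySem.List.enumerate T).flatMap (fun q => q.2.map (fun x => (x, q.1)))).filter
          (fun p => p.1 == e)).map (fun p => p.2) := by
  have h : pvIndex T
      = ((PySem.List.enumerate T).flatMap (fun q => q.2.map (fun x => (x, q.1)))).foldl
          (fun d p => d.modify p.1 [] (fun l => l ++ [p.2])) PySem.Dict.empty := by
    rw [List.foldl_flatMap]
    simp only [List.foldl_map]
    rfl
  rw [h, PySem.Dict.getD_foldl_modify_append]
  simp

lemma flat_enum_snd (T : List (List Int)) :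
    (PySem.List.enumerate T).flatMap (fun q => q.2.map (fun x => (x, q.1)))
      = (List.range T.length).flatMap (fun k => (T.getD k []).map (fun x => (x, (k : Int)))) := by
  rw [PySem.List.enumerate_eq_map_pyRange T [], List.flatMap_map, PySem.List.pyRange_one]
  rw [List.flatMap_map]
  apply List.flatMap_congr
  intro k _
  simp [PySem.List.pyGetD_natCast]

lemma index_count (T : List (List Int)) (hT : ∀ t ∈ T, t.Nodup) (e : Int) (kb : Nat)
    (hkb : kb < T.length) :
    ((pvIndex T).getD e []).count ((kb : Int))
      = if e ∈ T[kb] then 1 else 0 := by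
  rw [index_getD, count_map_snd_filter_fst, flat_enum_snd, count_flatMap_sndTag]
  rw [if_pos hkb, List.getD_eq_getElem T [] hkb]
  by_cases h : e ∈ T[kb]
  · rw [if_pos h, List.count_eq_one_of_mem (hT _ (List.getElem_mem hkb)) h]
  · rw [if_neg h, List.count_eq_zero.mpr h]

def pvCounts (S T : List (List Int)) : PySem.Dict (Int × Int) Int :=
  (PySem.List.enumerate S).foldl (fun c p =>
    p.2.foldl (fun c e =>
      ((pvIndex T).getD e []).foldl (fun c bi => c.modify (p.1, bi) 0 (fun x => x + 1)) c) c)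
    PySem.Dict.empty

lemma counts_getD (S T : List (List Int)) (k : Int × Int) :
    (pvCounts S T).getD k 0
      = (((PySem.List.enumerate S).flatMap (fun p =>
          p.2.flatMap (fun e => ((pvIndex T).getD e []).map (fun bi => (p.1, bi))))).count k : Int) := by
  have h : pvCounts S T
      = ((PySem.List.enumerate S).flatMap (fun p =>
          p.2.flatMap (fun e => ((pvIndex T).getD e []).map (fun bi => (p.1, bi))))).foldl
          (fun c x => c.modify x 0 (fun v => v + 1)) PySem.Dict.empty := by
    rw [List.foldl_flatMap]
    simp only [List.foldl_flatMap, List.foldl_map]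
    rfl
  rw [h, PySem.Dict.getD_foldl_modify_add_one]
  simp

lemma pair_count (S T : List (List Int)) (hT : ∀ t ∈ T, t.Nodup) (ka kb : Nat)
    (hka : ka < S.length) (hkb : kb < T.length) :
    (pvCounts S T).getD ((ka : Int), (kb : Int)) 0
      = (S[ka].countP (fun e => decide (e ∈ T[kb])) : Int) := by
  rw [counts_getD]
  have hflat : (PySem.List.enumerate S).flatMap (fun p =>
        p.2.flatMap (fun e => ((pvIndex T).getD e []).map (fun bi => (p.1, bi))))
      = (List.range S.length).flatMap (fun j =>
          ((S.getD j []).flatMap (fun e => (pvIndex T).getD e [])).map (fun bi => ((j : Int), bi))) := by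
    rw [PySem.List.enumerate_eq_map_pyRange S [], List.flatMap_map, PySem.List.pyRange_one]
    rw [List.flatMap_map]
    apply List.flatMap_congr
    intro j _
    simp [PySem.List.pyGetD_natCast, List.map_flatMap]
  rw [hflat, count_flatMap_fstTag, if_pos hka, List.getD_eq_getElem S [] hka]
  congr 1
  rw [List.count_flatMap]
  have hpt : ∀ e ∈ S[ka], (List.count ((kb:Int)) ∘ fun e => (pvIndex T).getD e []) e
      = if e ∈ T[kb] then 1 else 0 := fun e _ => index_count T hT e kb hkb
  rw [List.map_congr_left hpt]
  exact sum_map_indicator S[ka] (fun e => e ∈ T[kb])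

lemma inter_len (s t : List Int) :
    PySem.Set.len (PySem.Set.inter s t) = (s.countP (fun e => decide (e ∈ t)) : Int) := by
  have h : s.countP (fun x => t.contains x) = s.countP (fun e => decide (e ∈ t)) := by
    apply List.countP_congr
    intro x _
    simp
  rw [← h]
  simp [PySem.Set.len, PySem.Set.inter, List.countP_eq_length_filter]

lemma rows_eq (S T : List (List Int)) (hT : ∀ t ∈ T, t.Nodup) :
    (PySem.List.enumerate S).flatMap (fun p =>
        ((PySem.List.enumerate T).filter (fun q => decide (p.1 < q.1))).map
          (fun q => (p.1, q.1, PySem.Set.len (PySem.Set.inter p.2 q.2))))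
      = (PySem.List.pyRange 0 S.length).flatMap (fun ai =>
          ((PySem.List.pyRange 0 T.length).filter (fun bi => decide (ai < bi))).map
            (fun bi => (ai, bi, (pvCounts S T).getD (ai, bi) 0))) := by
  rw [PySem.List.enumerate_eq_map_pyRange S [], PySem.List.enumerate_eq_map_pyRange T []]
  rw [List.flatMap_map]
  have hlen : ∀ (L : List (List Int)), PySem.List.len L = (L.length : Int) := by
    intro L; simp [PySem.List.len]
  rw [hlen, hlen]
  apply List.flatMap_congr
  intro ai hai
  obtain ⟨hai0, hailt⟩ := PySem.List.mem_pyRange_one.mp hai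
  rw [List.filter_map, List.map_map]
  apply List.map_congr_left
  intro bi hbi
  obtain ⟨hbimem, _⟩ := List.mem_filter.mp hbi
  obtain ⟨hbi0, hbilt⟩ := PySem.List.mem_pyRange_one.mp hbimem
  simp only [Function.comp]
  obtain ⟨ka, rfl⟩ : ∃ k : Nat, ai = (k : Int) := ⟨ai.toNat, (Int.toNat_of_nonneg hai0).symm⟩
  obtain ⟨kb, rfl⟩ : ∃ k : Nat, bi = (k : Int) := ⟨bi.toNat, (Int.toNat_of_nonneg hbi0).symm⟩
  have hka : ka < S.length := by exact_mod_cast hailt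
  have hkb : kb < T.length := by exact_mod_cast hbilt
  rw [PySem.List.pyGetD_natCast, PySem.List.pyGetD_natCast,
    List.getD_eq_getElem S [] hka, List.getD_eq_getElem T [] hkb,
    pair_count S T hT ka kb hka hkb, inter_len]

lemma nodup_mapOfList (L : List (List Int)) : ∀ t ∈ L.map (fun s => PySem.Set.ofList s), t.Nodup := by
  intro t ht
  obtain ⟨s, _, rfl⟩ := List.mem_map.mp ht
  exact PySem.Set.nodup_ofList s

-- ===== VERDICT (by name: the statement is the Claim_ definition above) =====
theorem setsimilarities_spec : Claim_equal_setsimilarities := by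
  intro sets othersets _
  unfold Spec_setsimilarities setsimilarities setsimilarities_alt
  cases othersets with
  | none =>
    simp only [PySem.List.dedup_eq_ofList]
    exact congrArg (fun l => PySem.List.sorted l (fun row => row.2.2) true)
      (rows_eq (sets.map fun s => PySem.Set.ofList s) (sets.map fun s => PySem.Set.ofList s)
        (nodup_mapOfList sets))
  | some o =>
    simp only [PySem.List.dedup_eq_ofList]
    exact congrArg (fun l => PySem.List.sorted l (fun row => row.2.2) true)
      (rows_eq (sets.map fun s => PySem.Set.ofList s) (o.map fun s => PySem.Set.ofList s)
        (nodup_mapOfList o))
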